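-- pv_equiv track=rewrite | github.com/SWORDIntel/GETMOVIN | modules/loghunter_integration.py | _parse_loghunter_output
-- ===== SOURCE A (Python) =====
-- from typing import Dict, List, Any, Optional
--
-- def _parse_loghunter_output(output: str) -> List[Dict[str, Any]]:
--     """Parse LogHunter output into structured events"""
--     events = []
--
--     # Basic parsing - would need to match LogHunter's actual output format
--     lines = output.split('\n')
--     current_event = {}
--
--     for line in lines:
--         if 'EventID:' in line or 'Event ID:' in line:
--             if current_event:
--                 events.append(current_event)
--             current_event = {'raw': line}
--         elif current_event:
--             current_event['raw'] += '\n' + line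
--
--     if current_event:
--         events.append(current_event)
--
--     return events
-- ===== SOURCE B (Python) =====
-- def _parse_loghunter_output(output):
--     """Parse LogHunter output into structured events (back-to-front chunking)."""
--     lines = output.split('\n')
--     events = []
--     buf = []
--     for line in reversed(lines):
--         buf.append(line)
--         if 'EventID:' in line or 'Event ID:' in line:
--             events.append({'raw': '\n'.join(reversed(buf))})
--             buf = []
--     events.reverse()
--     return events
-- ===== Notes on version B (the rewrite author's own statement) =====
-- stated objective: alternative
-- what changed: Replaced A's forward loop with a mutable current-event dict and incremental string concatenation by a single backward pass that collects lines into a buffer and flushes one joined chunk per delimiter line, reversing at the end.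
import Mathlib
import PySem

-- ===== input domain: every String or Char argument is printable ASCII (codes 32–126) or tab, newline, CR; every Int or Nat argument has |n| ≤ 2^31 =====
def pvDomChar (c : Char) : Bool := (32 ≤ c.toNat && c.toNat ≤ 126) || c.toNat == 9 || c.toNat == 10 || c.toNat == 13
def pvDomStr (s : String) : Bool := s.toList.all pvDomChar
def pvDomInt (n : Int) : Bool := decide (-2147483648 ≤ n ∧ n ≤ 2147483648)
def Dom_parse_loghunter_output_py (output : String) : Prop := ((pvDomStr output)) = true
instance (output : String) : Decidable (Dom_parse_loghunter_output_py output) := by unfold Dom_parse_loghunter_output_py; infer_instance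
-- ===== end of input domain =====

-- B replaces A's forward loop with a mutable accumulator dict by a single backward
-- pass that chunks lines at delimiter lines (alternative decomposition, same cost).

-- 'EventID:' in line or 'Event ID:' in line
def pvDelim (line : String) : Bool :=
  PySem.Str.isIn "EventID:" line || PySem.Str.isIn "Event ID:" line

-- output.split('\n')  (separator is non-empty, so the split is total)
def pvLines (output : String) : List String :=
  (PySem.Chars.splitOn output.toList ['\n']).map String.ofList

-- ===== PORT A =====
-- loop body of A: state = (events, current_event)
def pvStepA (st : List (PySem.Dict String String) × PySem.Dict String String)
    (line : String) : List (PySem.Dict String String) × PySem.Dict String String :=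
  if pvDelim line then
    ((if st.2.items.isEmpty then st.1 else st.1 ++ [st.2]),
     PySem.Dict.ofList [("raw", line)])
  else if st.2.items.isEmpty then st
  else (st.1, PySem.Dict.modify st.2 "raw" "" (fun s => s ++ ("\n" ++ line)))

def parse_loghunter_output_py (output : String) : List (List (String × String)) :=
  let st := (pvLines output).foldl pvStepA ([], PySem.Dict.ofList [])
  (if st.2.items.isEmpty then st.1 else st.1 ++ [st.2]).map PySem.Dict.items

-- ===== PORT B =====
-- loop body of B: Python iterates reversed(lines) appending to buf and finally
-- reverses both; the foldr with prepends is that same backward loop with each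
-- list kept in its final (forward) order.  state = (events, buf)
def pvStepB (line : String) (st : List (PySem.Dict String String) × List String) :
    List (PySem.Dict String String) × List String :=
  let buf' := line :: st.2
  if pvDelim line then
    (PySem.Dict.ofList [("raw", PySem.Str.join "\n" buf')] :: st.1, [])
  else (st.1, buf')

def parse_loghunter_output_py_alt (output : String) : List (List (String × String)) :=
  (((pvLines output).foldr pvStepB ([], [])).1).map PySem.Dict.items

-- ===== PRECONDITION & SPEC =====
def Spec_parse_loghunter_output_py (output : String) (out : List (List (String × String))) : Prop := out = parse_loghunter_output_py_alt output
instance (output : String) (out : List (List (String × String))) : Decidable (Spec_parse_loghunter_output_py output out) := by unfold Spec_parse_loghunter_output_py; infer_instance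

-- ===== CLAIM (what is proved, stated in full; the proofs are below) =====
def Claim_equal_parse_loghunter_output_py : Prop := ∀ (output : String), Dom_parse_loghunter_output_py output → Spec_parse_loghunter_output_py output (parse_loghunter_output_py output)

-- ===== LEMMAS AND PROOFS =====

-- A's trailing 'if current_event: events.append(current_event)'
def pvFinA (st : List (PySem.Dict String String) × PySem.Dict String String) :
    List (PySem.Dict String String) :=
  if st.2.items.isEmpty then st.1 else st.1 ++ [st.2]

lemma pvJoinSingle (s : String) : PySem.Str.join "\n" [s] = s := by
  rw [← String.toList_inj, PySem.Str.toList_join]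
  simp [PySem.Chars.join_singleton]

lemma pvJoinCons (a b : String) (r : List String) :
    PySem.Str.join "\n" ((a ++ ("\n" ++ b)) :: r) = PySem.Str.join "\n" (a :: b :: r) := by
  rw [← String.toList_inj, PySem.Str.toList_join, PySem.Str.toList_join]
  cases r with
  | nil =>
      simp [PySem.Chars.join_singleton, PySem.Chars.join_cons_cons, List.append_assoc]
  | cons c r' =>
      simp [PySem.Chars.join_cons_cons, List.append_assoc]

-- the one-key dicts A manipulates, in explicit form
lemma pvOfListRaw (line : String) :
    PySem.Dict.ofList [("raw", line)] = PySem.Dict.mk [("raw", line)] := by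
  rfl

lemma pvModifyRaw (s : String) (f : String → String) :
    PySem.Dict.modify (PySem.Dict.mk [("raw", s)]) "raw" "" f
      = PySem.Dict.mk [("raw", f s)] := by
  rfl

-- the loop invariant: A's fold from (evs0, cur) against B's foldr state
lemma pvMain (lines : List String) :
    (∀ (evs0 : List (PySem.Dict String String)) (s : String),
        pvFinA (lines.foldl pvStepA (evs0, PySem.Dict.mk [("raw", s)]))
          = evs0
            ++ [PySem.Dict.mk [("raw",
                  PySem.Str.join "\n" (s :: (lines.foldr pvStepB ([], [])).2))]]
            ++ (lines.foldr pvStepB ([], [])).1)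
    ∧ (∀ (evs0 : List (PySem.Dict String String)),
        pvFinA (lines.foldl pvStepA (evs0, PySem.Dict.mk []))
          = evs0 ++ (lines.foldr pvStepB ([], [])).1) := by
  induction lines with
  | nil =>
      constructor
      · intro evs0 s
        simp [pvFinA, pvJoinSingle]
      · intro evs0
        simp [pvFinA]
  | cons l rest ih =>
      obtain ⟨ih1, ih2⟩ := ih
      constructor
      · intro evs0 s
        by_cases hd : pvDelim l = true
        · simp only [List.foldl_cons, List.foldr_cons, pvStepA, pvStepB, hd, if_true,
            List.isEmpty_cons, Bool.false_eq_true, if_false, pvOfListRaw]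
          rw [ih1]
          simp [pvJoinSingle, List.append_assoc]
        · simp only [List.foldl_cons, List.foldr_cons, pvStepA, pvStepB, hd,
            Bool.false_eq_true, if_false, List.isEmpty_cons, pvModifyRaw]
          rw [ih1, pvJoinCons]
      · intro evs0
        by_cases hd : pvDelim l = true
        · simp only [List.foldl_cons, List.foldr_cons, pvStepA, pvStepB, hd, if_true,
            List.isEmpty_nil, pvOfListRaw]
          rw [ih1]
          simp [List.append_assoc]
        · simp only [List.foldl_cons, List.foldr_cons, pvStepA, pvStepB, hd,
            Bool.false_eq_true, if_false, List.isEmpty_nil, if_true]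
          exact ih2 evs0

-- ===== VERDICT (by name: the statement is the Claim_ definition above) =====
theorem parse_loghunter_output_py_spec : Claim_equal_parse_loghunter_output_py := by
  intro output _
  unfold Spec_parse_loghunter_output_py parse_loghunter_output_py parse_loghunter_output_py_alt
  have hofl : PySem.Dict.ofList ([] : List (String × String)) = PySem.Dict.mk [] := rfl
  have h := (pvMain (pvLines output)).2 []
  unfold pvFinA at h
  simp only [List.nil_append] at h
  simp at h
  simp [hofl, h]
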